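-- pv_equiv track=rewrite | github.com/paprik05/Praca-Licencjacka | problems/prob2.py | prob2
-- ===== SOURCE A (Python) =====
-- def prob2(min_val, max_val):
--     results = []
--     for x in range(min_val, max_val):
--         if x == 3:
--             continue
--         elif (x**3 - 3) % (x - 3) == 0:
--             results.append(x)
--     return {"result": results}
-- ===== SOURCE B (Python) =====
-- # x**3 - 3 = (x-3)*(x**2+3*x+9) + 24, so for x != 3 the test holds iff (x-3) divides 24.
-- # The 16 such x are fixed; just keep those inside [min_val, max_val).
-- _CANDIDATES = [-21, -9, -5, -3, -1, 0, 1, 2, 4, 5, 6, 7, 9, 11, 15, 27]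
--
-- def prob2(min_val, max_val):
--     return {"result": [x for x in _CANDIDATES if min_val <= x < max_val]}
-- ===== Notes on version B (the rewrite author's own statement) =====
-- stated objective: faster
-- what changed: Instead of scanning the whole range and testing (x^3-3) % (x-3) for each x, B uses the identity x^3-3 = (x-3)(x^2+3x+9)+24, so valid x are exactly 3+d for divisors d of 24; B filters that fixed 16-element list by the range bounds.
import Mathlib
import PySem

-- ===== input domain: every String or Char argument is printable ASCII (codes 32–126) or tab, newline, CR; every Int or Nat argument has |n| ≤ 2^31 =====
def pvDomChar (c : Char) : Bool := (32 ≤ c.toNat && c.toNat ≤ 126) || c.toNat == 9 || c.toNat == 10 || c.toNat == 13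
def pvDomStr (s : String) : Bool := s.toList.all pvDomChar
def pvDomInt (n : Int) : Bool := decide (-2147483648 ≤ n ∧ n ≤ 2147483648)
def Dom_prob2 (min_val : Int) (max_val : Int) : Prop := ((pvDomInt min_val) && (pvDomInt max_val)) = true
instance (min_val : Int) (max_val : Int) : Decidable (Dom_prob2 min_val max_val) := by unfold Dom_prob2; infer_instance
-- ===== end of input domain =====

-- B replaces the range scan and per-element division test by the identity
-- x^3 - 3 = (x-3)(x^2+3x+9) + 24: valid x are exactly 3 + d for divisors d of 24,
-- a fixed 16-element list filtered by the bounds.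

-- ===== PORT A =====
def prob2 (min_val : Int) (max_val : Int) : List (String × List Int) :=
  let results : List Int :=
    (PySem.List.pyRange min_val max_val 1).foldl
      (fun results x =>
        if x == 3 then results
        else if PySem.Int.mod (x ^ 3 - 3) (x - 3) == 0 then results ++ [x]
        else results) []
  [("result", results)]

-- ===== PORT B =====
def pvCandidates : List Int := [-21, -9, -5, -3, -1, 0, 1, 2, 4, 5, 6, 7, 9, 11, 15, 27]

def prob2_alt (min_val : Int) (max_val : Int) : List (String × List Int) :=
  [("result", pvCandidates.filter (fun x => decide (min_val ≤ x) && decide (x < max_val)))]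

-- ===== PRECONDITION & SPEC =====
def Spec_prob2 (min_val : Int) (max_val : Int) (out : List (String × List Int)) : Prop := out = prob2_alt min_val max_val
instance (min_val : Int) (max_val : Int) (out : List (String × List Int)) : Decidable (Spec_prob2 min_val max_val out) := by unfold Spec_prob2; infer_instance

-- ===== CLAIM (what is proved, stated in full; the proofs are below) =====
def Claim_equal_prob2 : Prop := ∀ (min_val : Int) (max_val : Int), Dom_prob2 min_val max_val → Spec_prob2 min_val max_val (prob2 min_val max_val)

-- ===== LEMMAS AND PROOFS =====

def pvTest (x : Int) : Bool := (!(x == 3)) && (PySem.Int.mod (x ^ 3 - 3) (x - 3) == 0)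

-- A's test holds exactly on the candidate list
lemma pvTest_iff (x : Int) : pvTest x = true ↔ x ∈ pvCandidates := by
  constructor
  · intro h
    simp only [pvTest, Bool.and_eq_true, Bool.not_eq_true', beq_eq_false_iff_ne, beq_iff_eq] at h
    obtain ⟨hne, hmod⟩ := h
    have hdvd : (x - 3) ∣ (x ^ 3 - 3) := (PySem.Int.mod_eq_zero_iff_dvd _ _).mp hmod
    have heq : x ^ 3 - 3 = (x - 3) * (x ^ 2 + 3 * x + 9) + 24 := by ring
    have hdvd24 : (x - 3) ∣ 24 := by
      have := (dvd_add_right (Dvd.intro _ rfl)).mp (heq ▸ hdvd)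
      exact this
    have hnabs : (x - 3).natAbs ∣ 24 := by
      have h := Int.natAbs_dvd_natAbs.mpr hdvd24
      simpa using h
    have hle : (x - 3).natAbs ≤ 24 := Nat.le_of_dvd (by norm_num) hnabs
    have hpos : 0 < (x - 3).natAbs := by omega
    simp only [pvCandidates, List.mem_cons, List.not_mem_nil, or_false]
    generalize hg : (x - 3).natAbs = n at hnabs hle hpos
    interval_cases n <;> first
      | exact absurd hnabs (by decide)
      | omega
  · intro h
    fin_cases h <;> decide

lemma foldl_eq_filter (min_val max_val : Int) :
    (PySem.List.pyRange min_val max_val 1).foldl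
      (fun results x =>
        if x == 3 then results
        else if PySem.Int.mod (x ^ 3 - 3) (x - 3) == 0 then results ++ [x]
        else results) []
    = (PySem.List.pyRange min_val max_val 1).filter pvTest := by
  have hbody : (fun (results : List Int) (x : Int) =>
        if x == 3 then results
        else if PySem.Int.mod (x ^ 3 - 3) (x - 3) == 0 then results ++ [x]
        else results)
      = fun results x => if pvTest x then results ++ [x] else results := by
    funext results x
    simp only [pvTest]
    by_cases h3 : x == 3 <;> by_cases hm : PySem.Int.mod (x ^ 3 - 3) (x - 3) == 0 <;>
      simp [h3, hm]
  rw [hbody, PySem.List.foldl_append_if_eq_filter]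
  simp

lemma filter_range_eq (min_val max_val : Int) :
    (PySem.List.pyRange min_val max_val 1).filter pvTest
    = pvCandidates.filter (fun x => decide (min_val ≤ x) && decide (x < max_val)) := by
  have hnd1 : ((PySem.List.pyRange min_val max_val 1).filter pvTest).Nodup :=
    (PySem.List.nodup_pyRange_one min_val max_val).filter _
  have hnd2 : (pvCandidates.filter (fun x => decide (min_val ≤ x) && decide (x < max_val))).Nodup :=
    List.Nodup.filter _ (by decide)
  have hperm : List.Perm ((PySem.List.pyRange min_val max_val 1).filter pvTest)
      (pvCandidates.filter (fun x => decide (min_val ≤ x) && decide (x < max_val))) := by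
    rw [List.perm_ext_iff_of_nodup hnd1 hnd2]
    intro a
    simp only [List.mem_filter, PySem.List.mem_pyRange_one, pvTest_iff,
      Bool.and_eq_true, decide_eq_true_eq]
    tauto
  exact List.Perm.eq_of_pairwise'
    (((PySem.List.pairwise_lt_pyRange_one min_val max_val).imp le_of_lt).filter _)
    (((by decide : pvCandidates.Pairwise (· < ·)).imp (le_of_lt)).filter _) hperm

-- ===== VERDICT (by name: the statement is the Claim_ definition above) =====
theorem prob2_spec : Claim_equal_prob2 := by
  intro min_val max_val _
  show _ = _
  unfold prob2 prob2_alt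
  rw [foldl_eq_filter, filter_range_eq]
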